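-- pv_equiv track=rewrite | github.com/ghqls1237/AlgorithmStudy | hobin/1402 Reducing Dishes.py | maxSatisfaction
-- ===== SOURCE A (Python) =====
-- from typing import List
--
-- def maxSatisfaction(satisfaction: List[int]) -> int:
--     satisfaction.sort(reverse=True)
--     result = []
--     sum = 0
--     if satisfaction[0] < 0:
--         return 0
--
--     for i in range(len(satisfaction)):
--         for j in range(i+1):
--             sum = sum + satisfaction[j]
--         result.append(sum)
--     return max(result)
-- ===== SOURCE B (Python) =====
-- from typing import List
--
-- def maxSatisfaction(satisfaction: List[int]) -> int:
--     # One pass over the descending-sorted list: p is the running prefix sum,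
--     # t the running total satisfaction of the current prefix, best the answer.
--     best = 0
--     p = 0
--     t = 0
--     for x in sorted(satisfaction, reverse=True):
--         p += x
--         t += p
--         best = max(best, t)
--     return best
-- ===== Notes on version B (the rewrite author's own statement) =====
-- stated objective: faster
-- what changed: Replaces the quadratic nested loop (recomputing every prefix sum from scratch and collecting all totals into a list for max()) by a single pass after the sort that maintains an incremental prefix sum, running total and running maximum.
import Mathlib
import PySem

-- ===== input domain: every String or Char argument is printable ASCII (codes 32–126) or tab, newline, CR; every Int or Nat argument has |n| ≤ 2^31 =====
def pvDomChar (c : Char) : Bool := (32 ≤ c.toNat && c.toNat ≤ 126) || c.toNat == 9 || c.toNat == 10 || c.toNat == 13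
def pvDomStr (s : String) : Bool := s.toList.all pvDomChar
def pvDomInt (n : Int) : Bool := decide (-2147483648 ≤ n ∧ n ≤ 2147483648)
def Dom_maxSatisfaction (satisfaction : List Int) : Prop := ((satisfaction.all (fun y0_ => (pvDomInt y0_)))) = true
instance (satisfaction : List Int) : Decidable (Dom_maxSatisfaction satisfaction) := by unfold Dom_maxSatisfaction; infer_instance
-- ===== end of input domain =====

-- B replaces A's quadratic nested loop by a single pass with an incremental prefix sum and
-- running maximum after the sort (asymptotically faster). A sorts its argument in place;
-- B does not mutate it — the equivalence proved here is about the return value only.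

-- ===== PORT A =====
def maxSatisfaction (satisfaction : List Int) : Int :=
  let s := PySem.List.sorted satisfaction (fun x => x) true
  match PySem.List.pyGet? s 0 with
  | none => 0        -- the first-element access raises IndexError on the empty list: excluded by Pre_
  | some h =>
    if h < 0 then 0
    else
      let st := (PySem.List.pyRange 0 (s.length : Int) 1).foldl
        (fun (st : List Int × Int) i =>
          let sum := (PySem.List.pyRange 0 (i + 1) 1).foldl
            (fun acc j => acc + PySem.List.pyGetD s j 0) st.2
          -- pyGetD is exact here: every index j satisfies 0 ≤ j ≤ i < len(s)
          (st.1 ++ [sum], sum)) ([], 0)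
      (PySem.List.max? st.1 (fun y => y)).getD 0   -- max(result); result is nonempty here

-- ===== PORT B =====
def maxSatisfaction_alt (satisfaction : List Int) : Int :=
  ((PySem.List.sorted satisfaction (fun x => x) true).foldl
    (fun (st : Int × Int × Int) x =>
      let p := st.2.1 + x
      let t := st.2.2 + p
      (max st.1 t, p, t)) (0, 0, 0)).1

-- ===== PRECONDITION & SPEC =====
-- Pre_ excludes only the empty list, on which A raises IndexError at its first-element access.
def Pre_maxSatisfaction (satisfaction : List Int) : Prop := satisfaction ≠ []
instance (satisfaction : List Int) : Decidable (Pre_maxSatisfaction satisfaction) := by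
  unfold Pre_maxSatisfaction; infer_instance
def pvWitness_maxSatisfaction : List Int := [1, -2]

def Spec_maxSatisfaction (satisfaction : List Int) (out : Int) : Prop := out = maxSatisfaction_alt satisfaction
instance (satisfaction : List Int) (out : Int) : Decidable (Spec_maxSatisfaction satisfaction out) := by unfold Spec_maxSatisfaction; infer_instance

-- ===== CLAIM (what is proved, stated in full; the proofs are below) =====
def Claim_equal_maxSatisfaction : Prop := ∀ (satisfaction : List Int), Dom_maxSatisfaction satisfaction → Pre_maxSatisfaction satisfaction → Spec_maxSatisfaction satisfaction (maxSatisfaction satisfaction)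

-- ===== LEMMAS AND PROOFS =====

-- The list of running totals t_1, …, t_n (and the final prefix sum p and total t):
-- the common mathematical skeleton of both loops.
def pvScan (l : List Int) (p t : Int) : List Int × Int × Int :=
  match l with
  | [] => ([], p, t)
  | x :: xs =>
    let r := pvScan xs (p + x) (t + (p + x))
    ((t + (p + x)) :: r.1, r.2)

theorem pvScan_p (l : List Int) (p t : Int) : (pvScan l p t).2.1 = p + l.sum := by
  induction l generalizing p t with
  | nil => simp [pvScan]
  | cons x xs ih => simp [pvScan, ih]; ring

theorem pvScan_append (l : List Int) (x p t : Int) :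
    pvScan (l ++ [x]) p t =
      ((pvScan l p t).1 ++ [(pvScan l p t).2.2 + ((pvScan l p t).2.1 + x)],
       (pvScan l p t).2.1 + x, (pvScan l p t).2.2 + ((pvScan l p t).2.1 + x)) := by
  induction l generalizing p t with
  | nil => simp [pvScan]
  | cons y ys ih => simp [pvScan, ih]

theorem pv_foldl_add (l : List Int) (c : Int) :
    l.foldl (fun a x => a + x) c = c + l.sum := by
  induction l generalizing c with
  | nil => simp
  | cons x xs ih => simp [ih]; ring

-- A's inner loop: sum of satisfaction[0..m-1] added to the accumulator.
theorem pv_inner (s : List Int) (m : Nat) (hm : m ≤ s.length) (c : Int) :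
    (PySem.List.pyRange 0 (m : Int) 1).foldl
      (fun acc j => acc + PySem.List.pyGetD s j 0) c = c + (s.take m).sum := by
  have hcong : (PySem.List.pyRange 0 (m : Int) 1).foldl
      (fun acc j => acc + PySem.List.pyGetD s j 0) c
      = (PySem.List.pyRange 0 (m : Int) 1).foldl
      (fun acc j => acc + PySem.List.pyGetD (s.take m) j 0) c := by
    apply PySem.List.foldl_congr_mem
    intro a j hj
    have h := (PySem.List.mem_pyRange_one).mp hj
    have h0 : (0:Int) ≤ j := by omega
    have h1 : j < (s.length : Int) := by omega
    have h2 : j < ((s.take m).length : Int) := by simp [List.length_take]; omega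
    rw [PySem.List.pyGetD_eq_getElem s (i := j) 0 h0 h1,
        PySem.List.pyGetD_eq_getElem (s.take m) (i := j) 0 h0 h2,
        List.getElem_take]
  rw [hcong]
  have hlen : ((s.take m).length : Int) = (m : Int) := by simp [List.length_take]; omega
  rw [← hlen, PySem.List.foldl_pyRange_zero_pyGetD' (s.take m) 0 (fun a x => a + x) c,
      pv_foldl_add]

-- A's outer loop computes exactly the pvScan totals (result list and final `sum`).
theorem pv_outer (s : List Int) :
    (PySem.List.pyRange 0 (s.length : Int) 1).foldl
      (fun (st : List Int × Int) i =>
        ((st.1 ++ [(PySem.List.pyRange 0 (i + 1) 1).foldl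
            (fun acc j => acc + PySem.List.pyGetD s j 0) st.2]),
         (PySem.List.pyRange 0 (i + 1) 1).foldl
            (fun acc j => acc + PySem.List.pyGetD s j 0) st.2)) ([], 0)
    = ((pvScan s 0 0).1, (pvScan s 0 0).2.2) := by
  induction s using List.reverseRecOn with
  | nil => simp [pvScan, PySem.List.pyRange]
  | append_singleton l x ih =>
    have hlen : (((l ++ [x]).length : Nat) : Int) = (l.length : Int) + 1 := by
      simp
    rw [hlen, PySem.List.pyRange_one_succ_right (a := 0) (b := (l.length : Int)) (by omega),
        List.foldl_append]
    have hpre : (PySem.List.pyRange 0 (l.length : Int) 1).foldl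
        (fun (st : List Int × Int) i =>
          ((st.1 ++ [(PySem.List.pyRange 0 (i + 1) 1).foldl
              (fun acc j => acc + PySem.List.pyGetD (l ++ [x]) j 0) st.2]),
           (PySem.List.pyRange 0 (i + 1) 1).foldl
              (fun acc j => acc + PySem.List.pyGetD (l ++ [x]) j 0) st.2)) ([], 0)
        = ((pvScan l 0 0).1, (pvScan l 0 0).2.2) := by
      rw [← ih]
      apply PySem.List.foldl_congr_mem
      intro st i hi
      have h := (PySem.List.mem_pyRange_one).mp hi
      have hm : (i + 1).toNat ≤ l.length := by omega
      have hm' : (i + 1).toNat ≤ (l ++ [x]).length := by simp; omega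
      have hc : ((i + 1).toNat : Int) = i + 1 := by omega
      rw [← hc, pv_inner (l ++ [x]) _ hm', pv_inner l _ hm,
          List.take_append_of_le_length hm]
    rw [hpre]
    have hm : ((l.length : Int) + 1) = (((l.length + 1 : Nat) : Nat) : Int) := by push_cast; ring
    have hfull : (PySem.List.pyRange 0 ((l.length : Int) + 1) 1).foldl
        (fun acc j => acc + PySem.List.pyGetD (l ++ [x]) j 0) (pvScan l 0 0).2.2
        = (pvScan l 0 0).2.2 + ((l ++ [x]).take (l.length + 1)).sum := by
      rw [hm]
      exact pv_inner (l ++ [x]) (l.length + 1) (by simp) _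
    simp only [List.foldl_cons, List.foldl_nil, hfull]
    rw [pvScan_append]
    have htake : ((l ++ [x]).take (l.length + 1)) = l ++ [x] := by
      apply List.take_of_length_le; simp
    simp [htake, pvScan_p]

-- B's loop is the running maximum of the pvScan totals.
theorem pv_bfold (l : List Int) (b p t : Int) :
    (l.foldl (fun (st : Int × Int × Int) x =>
      (max st.1 (st.2.2 + (st.2.1 + x)), st.2.1 + x, st.2.2 + (st.2.1 + x))) (b, p, t)).1
    = (pvScan l p t).1.foldl max b := by
  induction l generalizing b p t with
  | nil => simp [pvScan]
  | cons x xs ih => simp [pvScan, ih]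

theorem pv_foldl_max_of_le (l : List Int) (b : Int) (h : ∀ v ∈ l, v ≤ b) :
    l.foldl max b = b := by
  induction l generalizing b with
  | nil => rfl
  | cons x xs ih =>
    have hx : max b x = b := by
      have := h x (by simp); omega
    simp only [List.foldl_cons, hx]
    exact ih b (fun v hv => h v (by simp [hv]))

theorem pvScan_neg (l : List Int) (p t : Int) (hl : ∀ y ∈ l, y < 0)
    (hp : p ≤ 0) (ht : t ≤ 0) : ∀ v ∈ (pvScan l p t).1, v < 0 := by
  induction l generalizing p t with
  | nil => simp [pvScan]
  | cons x xs ih =>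
    intro v hv
    have hx : x < 0 := hl x (by simp)
    simp only [pvScan] at hv
    rcases List.mem_cons.mp hv with h | h
    · omega
    · exact ih (p + x) (t + (p + x)) (fun y hy => hl y (by simp [hy]))
        (by omega) (by omega) v h

-- ===== VERDICT (by name: the statement is the Claim_ definition above) =====
theorem maxSatisfaction_spec : Claim_equal_maxSatisfaction := by
  intro sat _ hpre
  unfold Spec_maxSatisfaction maxSatisfaction maxSatisfaction_alt
  have hs : PySem.List.sorted sat (fun x => x) true ≠ [] := by
    simpa [PySem.List.sorted_eq_nil_iff] using hpre
  rcases hsplit : PySem.List.sorted sat (fun x => x) true with _ | ⟨x, xs⟩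
  · exact absurd hsplit hs
  have hpw : (PySem.List.sorted sat (fun x => x) true).Pairwise (fun a b => b ≤ a) :=
    PySem.List.sorted_pairwise_rev sat (fun x => x)
  rw [hsplit] at hpw
  have hhead : ∀ y ∈ xs, y ≤ x := by
    intro y hy; exact (List.pairwise_cons.mp hpw).1 y hy
  have hget : PySem.List.pyGet? (x :: xs) 0 = some x := by
    simp [PySem.List.pyGet?, PySem.List.pyIdx?]
  simp only [hget]
  have houter := pv_outer (x :: xs)
  have hb := pv_bfold (x :: xs) 0 0 0
  by_cases hx : x < 0
  · -- all totals are negative, B's running max stays 0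
    simp only [hx, if_pos]
    rw [hb]
    have hall : ∀ y ∈ x :: xs, y < 0 := by
      intro y hy
      rcases List.mem_cons.mp hy with h | h
      · omega
      · have := hhead y h; omega
    have hneg := pvScan_neg (x :: xs) 0 0 hall (by omega) (by omega)
    rw [pv_foldl_max_of_le _ 0 (fun v hv => by have := hneg v hv; omega)]
  · simp only [hx, if_false]
    rw [hb]
    have hres : (pvScan (x :: xs) 0 0).1 = (0 + (0 + x)) :: (pvScan xs (0 + x) (0 + (0 + x))).1 := by
      simp [pvScan]
    simp only [houter, hres]
    rw [PySem.List.max?_id_cons]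
    simp only [Option.getD_some, List.foldl_cons]
    have h0 : max (0:Int) (0 + (0 + x)) = 0 + (0 + x) := by omega
    rw [h0]
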